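-- pv_equiv track=rewrite | github.com/kishonyWIS/measurementTimeVortex | torus_embedding/main.py | all_symmetric_lattices
-- ===== SOURCE A (Python) =====
-- def all_symmetric_lattices(L1: tuple[int,int,int], L2: tuple[int,int,int]):
--     def reflection(L):
--         return (-L[0], L[0]+L[1], L[2])
--     def rotation60degrees_and_time_reversal(L):
--         return (-L[1], L[0]+L[1], -L[2])
--     symmetric_lattices = []
--     for num_reflections in range(2):
--         for num_rotations in range(6):
--             L1_symmetric = L1
--             L2_symmetric = L2
--             for _ in range(num_reflections):
--                 L1_symmetric = reflection(L1_symmetric)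
--                 L2_symmetric = reflection(L2_symmetric)
--             for _ in range(num_rotations):
--                 L1_symmetric = rotation60degrees_and_time_reversal(L1_symmetric)
--                 L2_symmetric = rotation60degrees_and_time_reversal(L2_symmetric)
--             symmetric_lattices.append((L1_symmetric, L2_symmetric))
--     return symmetric_lattices
-- ===== SOURCE B (Python) =====
-- def all_symmetric_lattices(L1: tuple[int,int,int], L2: tuple[int,int,int]):
--     def reflection(L):
--         return (-L[0], L[0]+L[1], L[2])
--     def rotation60degrees_and_time_reversal(L):
--         return (-L[1], L[0]+L[1], -L[2])
--     out = []
--     for num_reflections in range(2):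
--         pair = (L1, L2) if num_reflections == 0 else (reflection(L1), reflection(L2))
--         for _ in range(6):
--             out.append(pair)
--             pair = (rotation60degrees_and_time_reversal(pair[0]),
--                     rotation60degrees_and_time_reversal(pair[1]))
--     return out
-- ===== Notes on version B (the rewrite author's own statement) =====
-- stated objective: simpler
-- what changed: B keeps a running transformed pair (reflect at most once up front, then emit-and-rotate six times) instead of re-applying all reflections and rotations from scratch for each of the 12 entries.
import Mathlib
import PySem

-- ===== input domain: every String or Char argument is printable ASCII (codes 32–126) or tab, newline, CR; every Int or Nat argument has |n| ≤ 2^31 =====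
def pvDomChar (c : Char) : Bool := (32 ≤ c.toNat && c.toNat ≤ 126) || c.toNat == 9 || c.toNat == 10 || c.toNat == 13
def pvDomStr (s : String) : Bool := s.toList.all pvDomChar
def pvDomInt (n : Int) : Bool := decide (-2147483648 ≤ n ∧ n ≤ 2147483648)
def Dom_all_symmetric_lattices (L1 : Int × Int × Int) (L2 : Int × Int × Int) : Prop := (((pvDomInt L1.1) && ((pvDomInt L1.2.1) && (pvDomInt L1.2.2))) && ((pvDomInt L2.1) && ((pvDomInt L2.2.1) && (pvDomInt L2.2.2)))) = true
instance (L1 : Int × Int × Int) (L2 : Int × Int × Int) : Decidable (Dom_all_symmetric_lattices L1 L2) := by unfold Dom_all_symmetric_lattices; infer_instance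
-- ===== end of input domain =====

-- B maintains a running transformed pair (reflect once up front, then emit-and-rotate) instead of
-- re-applying all the transforms from scratch for every entry; same 12 pairs in the same order.

-- shared tiny transforms (the nested Python helpers, identical in A and B)
def pvReflection (L : Int × Int × Int) : Int × Int × Int := (-L.1, L.1 + L.2.1, L.2.2)
def pvRotation (L : Int × Int × Int) : Int × Int × Int := (-L.2.1, L.1 + L.2.1, -L.2.2)

-- ===== PORT A =====
def all_symmetric_lattices (L1 : Int × Int × Int) (L2 : Int × Int × Int) : List ((Int × Int × Int) × (Int × Int × Int)) :=
  (PySem.List.pyRange 0 2 1).foldl (fun acc numRefl =>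
    (PySem.List.pyRange 0 6 1).foldl (fun acc numRot =>
      let p := (PySem.List.pyRange 0 numRefl 1).foldl
        (fun (p : (Int × Int × Int) × (Int × Int × Int)) _ => (pvReflection p.1, pvReflection p.2)) (L1, L2)
      let q := (PySem.List.pyRange 0 numRot 1).foldl
        (fun (p : (Int × Int × Int) × (Int × Int × Int)) _ => (pvRotation p.1, pvRotation p.2)) p
      acc ++ [q]) acc) []

-- ===== PORT B =====
def all_symmetric_lattices_alt (L1 : Int × Int × Int) (L2 : Int × Int × Int) : List ((Int × Int × Int) × (Int × Int × Int)) :=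
  (PySem.List.pyRange 0 2 1).foldl (fun out numRefl =>
    let start : (Int × Int × Int) × (Int × Int × Int) :=
      if numRefl == 0 then (L1, L2) else (pvReflection L1, pvReflection L2)
    ((PySem.List.pyRange 0 6 1).foldl
      (fun (st : List ((Int × Int × Int) × (Int × Int × Int)) × ((Int × Int × Int) × (Int × Int × Int))) _ =>
        (st.1 ++ [st.2], (pvRotation st.2.1, pvRotation st.2.2))) (out, start)).1) []

-- ===== PRECONDITION & SPEC =====
def Spec_all_symmetric_lattices (L1 : Int × Int × Int) (L2 : Int × Int × Int) (out : List ((Int × Int × Int) × (Int × Int × Int))) : Prop := out = all_symmetric_lattices_alt L1 L2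
instance (L1 : Int × Int × Int) (L2 : Int × Int × Int) (out : List ((Int × Int × Int) × (Int × Int × Int))) : Decidable (Spec_all_symmetric_lattices L1 L2 out) := by unfold Spec_all_symmetric_lattices; infer_instance

-- ===== CLAIM (what is proved, stated in full; the proofs are below) =====
def Claim_equal_all_symmetric_lattices : Prop := ∀ (L1 : Int × Int × Int) (L2 : Int × Int × Int), Dom_all_symmetric_lattices L1 L2 → Spec_all_symmetric_lattices L1 L2 (all_symmetric_lattices L1 L2)

-- ===== LEMMAS AND PROOFS =====
theorem pvRange2 : PySem.List.pyRange 0 2 1 = [0, 1] := by decide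
theorem pvRange6 : PySem.List.pyRange 0 6 1 = [0, 1, 2, 3, 4, 5] := by decide
theorem pvRange0 : PySem.List.pyRange 0 0 1 = [] := by decide
theorem pvRange1 : PySem.List.pyRange 0 1 1 = [0] := by decide
theorem pvRange3 : PySem.List.pyRange 0 3 1 = [0, 1, 2] := by decide
theorem pvRange4 : PySem.List.pyRange 0 4 1 = [0, 1, 2, 3] := by decide
theorem pvRange5 : PySem.List.pyRange 0 5 1 = [0, 1, 2, 3, 4] := by decide

-- ===== VERDICT (by name: the statement is the Claim_ definition above) =====
theorem all_symmetric_lattices_spec : Claim_equal_all_symmetric_lattices := by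
  intro L1 L2 _
  show all_symmetric_lattices L1 L2 = all_symmetric_lattices_alt L1 L2
  simp only [all_symmetric_lattices, all_symmetric_lattices_alt,
    pvRange2, pvRange6, pvRange0, pvRange1, pvRange3, pvRange4, pvRange5,
    List.foldl, List.nil_append, List.cons_append, beq_iff_eq, if_true]
  rfl
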